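-- pv_equiv track=rewrite | github.com/StarWalkin/Open_Align_dev | preference_dissection/collect_model_preference/alignment-decomposition/shared/codes/utils.py | remove_non_alphabetical_characters_head_and_tail
-- ===== SOURCE A (Python) =====
-- def remove_non_alphabetical_characters_head_and_tail(s):
--     first_alpha_index = -1
--     last_alpha_index = -1
--     for i in range(len(s)):
--         if s[i].isalpha():
--             first_alpha_index = i
--             break
--     for i in range(len(s) - 1, -1, -1):
--         if s[i].isalpha():
--             last_alpha_index = i
--             break
--     return s[first_alpha_index:last_alpha_index + 1]
-- ===== SOURCE B (Python) =====
-- def remove_non_alphabetical_characters_head_and_tail(s):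
--     first = -1
--     last = -1
--     for i, ch in enumerate(s):
--         if ch.isalpha():
--             if first == -1:
--                 first = i
--             last = i
--     return s[first:last + 1]
-- ===== Notes on version B (the rewrite author's own statement) =====
-- stated objective: alternative
-- what changed: Replaces A's two directed early-break scans (forward for the first alpha, backward for the last) with a single forward enumerate pass maintaining first/last indices; the no-alpha case falls out of the same s[-1:0] slice with no extra branch.
import Mathlib
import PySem

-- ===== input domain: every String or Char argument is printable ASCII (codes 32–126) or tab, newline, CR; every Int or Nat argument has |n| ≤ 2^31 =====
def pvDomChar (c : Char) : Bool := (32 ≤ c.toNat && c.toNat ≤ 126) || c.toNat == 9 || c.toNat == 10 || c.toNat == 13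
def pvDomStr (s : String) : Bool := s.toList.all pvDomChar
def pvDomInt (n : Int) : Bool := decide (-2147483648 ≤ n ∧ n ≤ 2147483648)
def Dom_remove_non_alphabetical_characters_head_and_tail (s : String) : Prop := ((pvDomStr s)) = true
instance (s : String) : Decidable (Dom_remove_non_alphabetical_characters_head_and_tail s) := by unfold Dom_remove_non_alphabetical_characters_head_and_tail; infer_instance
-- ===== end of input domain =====

-- B replaces A's two directed early-break scans with a single forward enumerate pass keeping first/last alpha indices (alternative decomposition, same cost).

-- ===== PORT A =====
-- a 'for i in <indices>: if s[i].isalpha(): <var> = i; break' loop, returning -1 if it never breaks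
def pvScanA (cs : List Char) : List Int → Int
  | [] => -1
  | i :: rest => if PySem.Chars.isalpha (PySem.List.pyGetD cs i ' ') then i else pvScanA cs rest

def remove_non_alphabetical_characters_head_and_tail (s : String) : String :=
  let cs := s.toList
  let first_alpha_index := pvScanA cs (PySem.List.pyRange 0 (cs.length : Int) 1)
  let last_alpha_index := pvScanA cs (PySem.List.pyRange ((cs.length : Int) - 1) (-1) (-1))
  PySem.Str.slice s (some first_alpha_index) (some (last_alpha_index + 1))

-- ===== PORT B =====
-- loop body of B: update (first, last) at one enumerated character
def pvStepB (p : Int × Int) (ic : Int × Char) : Int × Int :=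
  if PySem.Chars.isalpha ic.2 then ((if p.1 = -1 then ic.1 else p.1), ic.1) else p

def remove_non_alphabetical_characters_head_and_tail_alt (s : String) : String :=
  let p := (PySem.List.enumerate s.toList 0).foldl pvStepB (-1, -1)
  PySem.Str.slice s (some p.1) (some (p.2 + 1))

-- ===== PRECONDITION & SPEC =====
def Spec_remove_non_alphabetical_characters_head_and_tail (s : String) (out : String) : Prop := out = remove_non_alphabetical_characters_head_and_tail_alt s
instance (s : String) (out : String) : Decidable (Spec_remove_non_alphabetical_characters_head_and_tail s out) := by unfold Spec_remove_non_alphabetical_characters_head_and_tail; infer_instance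

-- ===== CLAIM (what is proved, stated in full; the proofs are below) =====
def Claim_equal_remove_non_alphabetical_characters_head_and_tail : Prop := ∀ (s : String), Dom_remove_non_alphabetical_characters_head_and_tail s → Spec_remove_non_alphabetical_characters_head_and_tail s (remove_non_alphabetical_characters_head_and_tail s)

-- ===== LEMMAS AND PROOFS =====

theorem pvScanA_append (cs : List Char) (a b : List Int)
    (ha : ∀ i ∈ a, (0:Int) ≤ i) :
    pvScanA cs (a ++ b) = if pvScanA cs a = -1 then pvScanA cs b else pvScanA cs a := by
  induction a with
  | nil => simp [pvScanA]
  | cons i rest ih =>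
    have hi : (0:Int) ≤ i := ha i (by simp)
    have hrest : ∀ j ∈ rest, (0:Int) ≤ j := fun j hj => ha j (by simp [hj])
    by_cases h : PySem.Chars.isalpha (PySem.List.pyGetD cs i ' ') = true
    · simp [pvScanA, h]
      omega
    · simp [pvScanA, h, ih hrest]

theorem pvScanA_congr (cs : List Char) (c : Char) (l : List Int)
    (h : ∀ i ∈ l, (0:Int) ≤ i ∧ i < (cs.length : Int)) :
    pvScanA (cs ++ [c]) l = pvScanA cs l := by
  induction l with
  | nil => rfl
  | cons i rest ih =>
    have hi := h i (by simp)
    obtain ⟨k, rfl⟩ := Int.eq_ofNat_of_zero_le hi.1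
    have hk : k < cs.length := by exact_mod_cast hi.2
    have hget : PySem.List.pyGetD (cs ++ [c]) (k : Int) ' ' = PySem.List.pyGetD cs (k : Int) ' ' := by
      simp [List.getD_eq_getElem?_getD, List.getElem?_append_left hk]
    simp only [pvScanA, hget, ih (fun j hj => h j (by simp [hj]))]

theorem pvKey (cs : List Char) :
    (pvScanA cs (PySem.List.pyRange 0 (cs.length : Int) 1),
     pvScanA cs (PySem.List.pyRange ((cs.length : Int) - 1) (-1) (-1)))
      = (PySem.List.enumerate cs 0).foldl pvStepB (-1, -1) := by
  induction cs using List.reverseRecOn with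
  | nil => decide
  | append_singleton cs c ih =>
    have hb : ∀ i ∈ PySem.List.pyRange 0 ((cs.length:Int)) 1, (0:Int) ≤ i ∧ i < (cs.length:Int) := by
      intro i hi; rw [PySem.List.mem_pyRange_one] at hi; omega
    have hbwd : ∀ i ∈ PySem.List.pyRange ((cs.length:Int) - 1) (-1) (-1), (0:Int) ≤ i ∧ i < (cs.length:Int) := by
      intro i hi; rw [PySem.List.mem_pyRange_neg_one] at hi; omega
    have hlen : (((cs ++ [c]).length : Int)) = (cs.length : Int) + 1 := by simp
    have hgetc : PySem.List.pyGetD (cs ++ [c]) ((cs.length:Int)) ' ' = c := by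
      simp [List.getD_eq_getElem?_getD]
    have hfwd : pvScanA (cs ++ [c]) (PySem.List.pyRange 0 (((cs ++ [c]).length : Int)) 1)
        = if pvScanA cs (PySem.List.pyRange 0 (cs.length:Int) 1) = -1
          then (if PySem.Chars.isalpha c then (cs.length:Int) else -1)
          else pvScanA cs (PySem.List.pyRange 0 (cs.length:Int) 1) := by
      rw [hlen, PySem.List.pyRange_one_succ_right (Int.natCast_nonneg _),
          pvScanA_append _ _ _ (fun i hi => (hb i hi).1),
          pvScanA_congr _ _ _ hb]
      by_cases h : pvScanA cs (PySem.List.pyRange 0 (cs.length:Int) 1) = -1 <;>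
        simp [h, pvScanA, hgetc]
    have hbwd' : pvScanA (cs ++ [c]) (PySem.List.pyRange (((cs ++ [c]).length : Int) - 1) (-1) (-1))
        = if PySem.Chars.isalpha c then (cs.length:Int)
          else pvScanA cs (PySem.List.pyRange ((cs.length:Int) - 1) (-1) (-1)) := by
      rw [hlen]
      have : ((cs.length:Int) + 1 - 1) = (cs.length:Int) := by omega
      rw [this, PySem.List.pyRange_neg_one_cons (by omega)]
      simp only [pvScanA, hgetc, pvScanA_congr _ _ _ hbwd]
    have hfold : (PySem.List.enumerate (cs ++ [c]) 0).foldl pvStepB (-1, -1)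
        = pvStepB ((PySem.List.enumerate cs 0).foldl pvStepB (-1, -1)) ((cs.length:Int), c) := by
      rw [PySem.List.enumerate_append]
      simp [PySem.List.enumerate, List.foldl_append]
    rw [hfold, ← ih, hfwd, hbwd', pvStepB]
    by_cases h : PySem.Chars.isalpha c = true <;>
      by_cases h2 : pvScanA cs (PySem.List.pyRange 0 (cs.length:Int) 1) = -1 <;>
      simp [h, h2]

-- ===== VERDICT (by name: the statement is the Claim_ definition above) =====
theorem remove_non_alphabetical_characters_head_and_tail_spec : Claim_equal_remove_non_alphabetical_characters_head_and_tail := by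
  intro s _
  unfold Spec_remove_non_alphabetical_characters_head_and_tail
  unfold remove_non_alphabetical_characters_head_and_tail remove_non_alphabetical_characters_head_and_tail_alt
  rw [← pvKey s.toList]
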